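-- pv_equiv track=rewrite | github.com/ashishmishra36/learnings | practice/gfg/max_zero.py | MaxZero
-- ===== SOURCE A (Python) =====
-- def MaxZero(arr, n):
--     # Your code goes here
--     m = 0
--     highest =0
--     for i in range(n):
--         z = str(arr[i]).count('0')
--         if z > m:
--             m = z
--             highest = arr[i]
--         elif z==m:
--             highest = max(arr[i],highest)
--     if m >0:
--         return highest
--     else:
--         return -1
-- ===== SOURCE B (Python) =====
-- def MaxZero(arr, n):
--     # Group pass: map each zero-digit count to the largest value having it,
--     # then answer from the table's maximal key.
--     best = {}
--     for i in range(n):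
--         z = str(arr[i]).count('0')
--         best[z] = max(best.get(z, arr[i]), arr[i])
--     if not best:
--         return -1
--     k = max(best)
--     return best[k] if k > 0 else -1
-- ===== Notes on version B (the rewrite author's own statement) =====
-- stated objective: alternative
-- what changed: Replaces the inline running (max-zero-count, best-value) state machine with a two-phase computation: one pass builds a dict from zero-digit count to the maximum value with that count, then the answer is read off the dict's maximal key.
import Mathlib
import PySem

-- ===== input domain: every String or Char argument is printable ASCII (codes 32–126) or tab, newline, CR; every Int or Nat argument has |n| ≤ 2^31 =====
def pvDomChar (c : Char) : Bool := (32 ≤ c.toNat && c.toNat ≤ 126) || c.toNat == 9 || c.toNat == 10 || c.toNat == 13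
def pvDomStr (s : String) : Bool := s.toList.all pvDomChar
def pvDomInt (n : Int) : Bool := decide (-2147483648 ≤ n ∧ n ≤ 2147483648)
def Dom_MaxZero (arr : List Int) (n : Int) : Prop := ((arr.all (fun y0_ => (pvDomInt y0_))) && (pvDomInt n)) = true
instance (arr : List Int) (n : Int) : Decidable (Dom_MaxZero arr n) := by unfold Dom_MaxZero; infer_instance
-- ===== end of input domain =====

-- B replaces A's inline running (max-count, best-value) state with a grouping dict
-- (zero-digit count ↦ max value with that count) read off afterwards; alternative decomposition, same cost.

-- str(v).count('0'), shared digit-counting primitive of both Pythons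
def zCount (v : Int) : Int := (PySem.Str.count (PySem.Int.toStr v) "0" : Int)

-- ===== PORT A =====
def MaxZero (arr : List Int) (n : Int) : Int :=
  -- for i in range(n): z = str(arr[i]).count('0'); running (m, highest)
  let st := (PySem.List.pyRange 0 n 1).foldl
    (fun (s : Int × Int) i =>
      let v := PySem.List.pyGetD arr i 0   -- arr[i]; in range under Pre_MaxZero
      let z := zCount v
      if z > s.1 then (z, v)
      else if z = s.1 then (s.1, max v s.2)
      else s) (0, 0)
  if st.1 > 0 then st.2 else -1

-- ===== PORT B =====
def MaxZero_alt (arr : List Int) (n : Int) : Int :=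
  -- best[z] = max(best.get(z, arr[i]), arr[i]) over i in range(n)
  let best := (PySem.List.pyRange 0 n 1).foldl
    (fun (d : PySem.Dict Int Int) i =>
      let v := PySem.List.pyGetD arr i 0   -- arr[i]; in range under Pre_MaxZero
      let z := zCount v
      d.insert z (max (d.getD z v) v)) PySem.Dict.empty
  if best.size = 0 then -1
  else
    match PySem.List.max? best.keys (fun k => k) with   -- max(best)
    | none => -1
    | some k => if k > 0 then best.getD k 0 else -1     -- best[k] if k > 0 else -1

-- ===== PRECONDITION & SPEC =====
-- Pre_ excludes exactly the inputs where A raises IndexError: n beyond len(arr).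
def Pre_MaxZero (arr : List Int) (n : Int) : Prop := n ≤ (arr.length : Int)
instance (arr : List Int) (n : Int) : Decidable (Pre_MaxZero arr n) := by unfold Pre_MaxZero; infer_instance
def pvWitness_MaxZero : List Int × Int := ([10, 205, 3, -100], 4)

def Spec_MaxZero (arr : List Int) (n : Int) (out : Int) : Prop := out = MaxZero_alt arr n
instance (arr : List Int) (n : Int) (out : Int) : Decidable (Spec_MaxZero arr n out) := by unfold Spec_MaxZero; infer_instance

-- ===== CLAIM (what is proved, stated in full; the proofs are below) =====
def Claim_equal_MaxZero : Prop := ∀ (arr : List Int) (n : Int), Dom_MaxZero arr n → Pre_MaxZero arr n → Spec_MaxZero arr n (MaxZero arr n)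

-- ===== LEMMAS AND PROOFS =====

-- A's loop body / B's loop body, as functions of the element value
def stepA (s : Int × Int) (v : Int) : Int × Int :=
  let z := zCount v
  if z > s.1 then (z, v) else if z = s.1 then (s.1, max v s.2) else s

def stepB (d : PySem.Dict Int Int) (v : Int) : PySem.Dict Int Int :=
  let z := zCount v
  d.insert z (max (d.getD z v) v)

-- the invariant tying A's running pair to B's dict
def InvAB (s : Int × Int) (d : PySem.Dict Int Int) : Prop :=
  0 ≤ s.1 ∧ (∀ k ∈ d.keys, 0 ≤ k ∧ k ≤ s.1) ∧
    (0 < s.1 → s.1 ∈ d.keys ∧ d.getD s.1 0 = s.2)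

theorem zCount_nonneg (v : Int) : 0 ≤ zCount v := by
  unfold zCount; exact Int.natCast_nonneg _

theorem getD_irrel {d : PySem.Dict Int Int} {k : Int} (h : k ∈ d.keys) (a b : Int) :
    d.getD k a = d.getD k b := by
  have hs : (d.get? k).isSome := by
    rw [← PySem.Dict.contains_eq_isSome_get?]
    exact (PySem.Dict.contains_iff_mem_keys d k).mpr h
  obtain ⟨w, hw⟩ := Option.isSome_iff_exists.mp hs
  rw [PySem.Dict.getD_of_get?_eq_some d a hw, PySem.Dict.getD_of_get?_eq_some d b hw]

theorem InvAB_step {s : Int × Int} {d : PySem.Dict Int Int} (h : InvAB s d) (v : Int) :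
    InvAB (stepA s v) (stepB d v) := by
  obtain ⟨h0, hk, hm⟩ := h
  have hz := zCount_nonneg v
  unfold stepA stepB
  simp only []
  set z := zCount v with hzdef
  by_cases hgt : z > s.1
  · -- new max count
    have hnot : d.contains z = false := by
      by_contra hc
      have : z ∈ d.keys := (PySem.Dict.contains_iff_mem_keys d z).mp (by
        cases hcc : d.contains z with
        | false => exact absurd hcc hc
        | true => rfl)
      exact absurd (hk z this).2 (by omega)
    have hgD : d.getD z v = v := PySem.Dict.getD_of_not_contains d v hnot
    refine ⟨?_, ?_, ?_⟩ <;> simp only [if_pos hgt]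
    · omega
    · intro k hkm
      rcases (PySem.Dict.mem_keys_insert d z k _).mp hkm with rfl | hin
      · exact ⟨hz, le_refl _⟩
      · have := hk k hin; constructor <;> omega
    · intro _
      refine ⟨(PySem.Dict.mem_keys_insert d z z _).mpr (Or.inl rfl), ?_⟩
      rw [PySem.Dict.getD_insert, if_pos rfl, hgD, max_self]
  · by_cases heq : z = s.1
    · -- tie on the max count
      refine ⟨?_, ?_, ?_⟩ <;> simp only [if_neg hgt, if_pos heq]
      · exact h0
      · intro k hkm
        rcases (PySem.Dict.mem_keys_insert d z k _).mp hkm with rfl | hin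
        · exact ⟨hz, le_of_eq heq⟩
        · exact hk k hin
      · intro hpos
        obtain ⟨hmem, hget⟩ := hm hpos
        have hzm : z ∈ d.keys := heq ▸ hmem
        refine ⟨(PySem.Dict.mem_keys_insert d z s.1 _).mpr (Or.inl heq.symm), ?_⟩
        rw [PySem.Dict.getD_insert, if_pos heq.symm,
          getD_irrel hzm v 0, heq, hget, max_comm]
    · -- smaller count: A's state unchanged
      refine ⟨?_, ?_, ?_⟩ <;> simp only [if_neg hgt, if_neg heq]
      · exact h0
      · intro k hkm
        rcases (PySem.Dict.mem_keys_insert d z k _).mp hkm with rfl | hin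
        · constructor <;> omega
        · exact hk k hin
      · intro hpos
        obtain ⟨hmem, hget⟩ := hm hpos
        refine ⟨(PySem.Dict.mem_keys_insert d z s.1 _).mpr (Or.inr hmem), ?_⟩
        rw [PySem.Dict.getD_insert, if_neg (by omega), hget]

theorem InvAB_foldl (xs : List Int) :
    ∀ (s : Int × Int) (d : PySem.Dict Int Int), InvAB s d →
      InvAB (xs.foldl stepA s) (xs.foldl stepB d) := by
  induction xs with
  | nil => intro s d h; exact h
  | cons x t ih => intro s d h; exact ih _ _ (InvAB_step h x)

-- both loops traverse the same value sequence: arr[i] for i in range(n)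
theorem range_vals (arr : List Int) (n : Int) (hn : n ≤ (arr.length : Int)) :
    (PySem.List.pyRange 0 n 1).map (fun i => PySem.List.pyGetD arr i 0)
      = arr.take n.toNat := by
  rw [PySem.List.pyRange_one]
  rw [List.map_map]
  have hlen : n.toNat ≤ arr.length := by omega
  apply List.ext_getElem
  · simp [hlen]
  · intro i h1 h2
    simp only [List.getElem_map, List.getElem_range, Function.comp]
    have : ((0 : Int) + (i : Int)) = ((i : Nat) : Int) := by omega
    rw [this, PySem.List.pyGetD_natCast]
    simp at h1 h2 ⊢
    rw [List.getElem?_eq_getElem (by omega)]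
    rfl

theorem keys_ne_nil_of_mem {d : PySem.Dict Int Int} {k : Int} (h : k ∈ d.keys) :
    d.keys ≠ [] := by intro hnil; rw [hnil] at h; exact absurd h (List.not_mem_nil)

-- ===== VERDICT (by name: the statement is the Claim_ definition above) =====
theorem MaxZero_spec : Claim_equal_MaxZero := by
  intro arr n _ hpre
  unfold Spec_MaxZero MaxZero MaxZero_alt
  have hmap := range_vals arr n hpre
  have hA : (PySem.List.pyRange 0 n 1).foldl
      (fun (s : Int × Int) i =>
        let v := PySem.List.pyGetD arr i 0
        let z := zCount v
        if z > s.1 then (z, v) else if z = s.1 then (s.1, max v s.2) else s) (0, 0)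
      = (arr.take n.toNat).foldl stepA (0, 0) := by
    rw [← hmap, List.foldl_map]; rfl
  have hB : (PySem.List.pyRange 0 n 1).foldl
      (fun (d : PySem.Dict Int Int) i =>
        let v := PySem.List.pyGetD arr i 0
        let z := zCount v
        d.insert z (max (d.getD z v) v)) PySem.Dict.empty
      = (arr.take n.toNat).foldl stepB PySem.Dict.empty := by
    rw [← hmap, List.foldl_map]; rfl
  simp only [hA, hB]
  have hrel : InvAB ((arr.take n.toNat).foldl stepA (0, 0))
      ((arr.take n.toNat).foldl stepB PySem.Dict.empty) := by
    apply InvAB_foldl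
    refine ⟨le_refl _, ?_, ?_⟩
    · intro k hk; simp [PySem.Dict.keys_empty] at hk
    · intro h; omega
  set s := (arr.take n.toNat).foldl stepA (0, 0)
  set d := (arr.take n.toNat).foldl stepB PySem.Dict.empty
  obtain ⟨h0, hk, hm⟩ := hrel
  by_cases hpos : 0 < s.1
  · obtain ⟨hmem, hget⟩ := hm hpos
    have hsz : ¬ d.size = 0 := by
      have := keys_ne_nil_of_mem hmem
      unfold PySem.Dict.size
      intro hz
      have : d.keys = [] := by
        unfold PySem.Dict.keys
        rw [List.length_eq_zero_iff.mp hz]; rfl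
      exact absurd this (keys_ne_nil_of_mem hmem)
    rw [if_pos hpos, if_neg hsz]
    cases hmax : PySem.List.max? d.keys (fun k => k) with
    | none =>
      exact absurd ((PySem.List.max?_eq_none_iff _ _).mp hmax) (keys_ne_nil_of_mem hmem)
    | some k =>
      have hk1 : k ≤ s.1 := (hk k (PySem.List.max?_mem hmax)).2
      have hk2 : s.1 ≤ k := PySem.List.max?_isMax hmax s.1 hmem
      have : k = s.1 := le_antisymm hk1 hk2
      subst this
      show s.2 = if s.1 > 0 then d.getD s.1 0 else -1
      rw [if_pos hpos, hget]
  · -- A's max count is 0: A returns -1; every key of d is 0, so B returns -1 too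
    rw [if_neg hpos]
    by_cases hsz : d.size = 0
    · rw [if_pos hsz]
    · rw [if_neg hsz]
      cases hmax : PySem.List.max? d.keys (fun k => k) with
      | none => rfl
      | some k =>
        have := hk k (PySem.List.max?_mem hmax)
        show (-1 : Int) = if k > 0 then d.getD k 0 else -1
        rw [if_neg (by omega)]
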